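-- pv_equiv track=rewrite | github.com/shuiliulcl/claw-skills | skills/feishu-gpt/bot_runtime/tools.py | _without_unsupported_format_args
-- ===== SOURCE A (Python) =====
-- def _without_unsupported_format_args(args: list[str]) -> list[str]:
--     cleaned = []
--     skip_next = False
--     for idx, item in enumerate(args):
--         if skip_next:
--             skip_next = False
--             continue
--         if item == "--format":
--             if idx + 1 < len(args) and str(args[idx + 1]).lower() == "json":
--                 skip_next = True
--             continue
--         cleaned.append(item)
--     return cleaned
-- ===== SOURCE B (Python) =====
-- def _without_unsupported_format_args(args: list[str]) -> list[str]:
--     def keep(i, tok):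
--         if tok == "--format":
--             return False
--         return not (i > 0 and args[i - 1] == "--format" and str(tok).lower() == "json")
--     return [tok for i, tok in enumerate(args) if keep(i, tok)]
-- ===== Notes on version B (the rewrite author's own statement) =====
-- stated objective: simpler
-- what changed: Replaced A's stateful skip_next loop with a stateless filter: each token is kept or dropped by a pure look-back predicate on its index (drop '--format', and drop a json-like token whose predecessor is '--format'), so no carried flag remains.
import Mathlib
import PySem

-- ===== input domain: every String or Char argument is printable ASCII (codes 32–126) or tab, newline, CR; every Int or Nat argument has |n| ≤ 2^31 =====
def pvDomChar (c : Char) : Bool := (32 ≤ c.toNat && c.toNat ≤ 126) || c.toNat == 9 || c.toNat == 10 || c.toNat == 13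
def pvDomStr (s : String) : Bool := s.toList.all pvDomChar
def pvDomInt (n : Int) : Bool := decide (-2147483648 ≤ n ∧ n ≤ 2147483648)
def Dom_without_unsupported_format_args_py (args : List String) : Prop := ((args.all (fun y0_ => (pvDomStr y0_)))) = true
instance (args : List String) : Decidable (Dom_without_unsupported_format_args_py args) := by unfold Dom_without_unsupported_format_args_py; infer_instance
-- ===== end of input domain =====

-- B replaces A's stateful skip_next loop with a stateless look-back filter (objective: simpler).
-- ===== PORT A =====
-- loop body: skip_next test, then the "--format" branch (sets skip_next iff the next
-- element exists and lowercases to "json"), else append item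
def pvStepA (args : List String) (st : List String × Bool) (p : Int × String) : List String × Bool :=
  if st.2 then (st.1, false)
  else if p.2 = "--format" then
    (st.1, decide (p.1 + 1 < (args.length : Int) ∧
             (PySem.List.pyGet? args (p.1 + 1)).map PySem.Str.lower = some "json"))
  else (st.1 ++ [p.2], st.2)

def without_unsupported_format_args_py (args : List String) : List String :=
  -- for idx, item in enumerate(args), folding the (cleaned, skip_next) state
  ((PySem.List.enumerate args).foldl (pvStepA args) ([], false)).1

-- ===== PORT B =====
def pvKeep (args : List String) (p : Int × String) : Bool :=
  decide (p.2 ≠ "--format" ∧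
    ¬(0 < p.1 ∧ PySem.List.pyGet? args (p.1 - 1) = some "--format" ∧
      PySem.Str.lower p.2 = "json"))

def without_unsupported_format_args_py_alt (args : List String) : List String :=
  ((PySem.List.enumerate args).filter (pvKeep args)).map (·.2)

-- ===== PRECONDITION & SPEC =====
def Spec_without_unsupported_format_args_py (args : List String) (out : List String) : Prop := out = without_unsupported_format_args_py_alt args
instance (args : List String) (out : List String) : Decidable (Spec_without_unsupported_format_args_py args out) := by unfold Spec_without_unsupported_format_args_py; infer_instance

-- ===== CLAIM (what is proved, stated in full; the proofs are below) =====
def Claim_equal_without_unsupported_format_args_py : Prop := ∀ (args : List String), Dom_without_unsupported_format_args_py args → Spec_without_unsupported_format_args_py args (without_unsupported_format_args_py args)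

-- ===== LEMMAS AND PROOFS =====

-- ===== VERDICT (by name: the statement is the Claim_ definition above) =====
theorem pvLoop (full : List String) :
    ∀ (l : List String) (k : Nat) (acc : List String) (skip : Bool),
      l = full.drop k →
      (skip = true → 0 < k ∧ full[k-1]? = some "--format" ∧
        l.head?.map PySem.Str.lower = some "json") →
      (skip = false → ∀ h, l.head? = some h → 0 < k → full[k-1]? = some "--format" →
        PySem.Str.lower h ≠ "json") →
      ((PySem.List.enumerate l (k:Int)).foldl (pvStepA full) (acc, skip)).1
        = acc ++ ((PySem.List.enumerate l (k:Int)).filter (pvKeep full)).map (·.2) := by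
  intro l
  induction l with
  | nil => intro k acc skip _ _ _; simp [PySem.List.enumerate_nil]
  | cons x xs ih =>
    intro k acc skip hk hs hn
    have hx : full[k]? = some x := by
      rw [← List.head?_drop, ← hk]; rfl
    have hxs : xs = full.drop (k+1) := by
      have := congrArg (List.drop 1) hk
      simpa [List.drop_drop, Nat.add_comm] using this
    have hcast1 : (k:Int) + 1 = ((k+1 : Nat) : Int) := by push_cast; ring
    have hhead : xs.head? = full[k+1]? := by rw [hxs, List.head?_drop]
    have hne : ∀ y : String, PySem.Str.lower y = "json" → y ≠ "--format" := by
      intro y hy he; rw [he] at hy; exact absurd hy (by decide)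
    rw [PySem.List.enumerate_cons]
    cases skip with
    | true =>
      obtain ⟨hk0, hprev, hjson⟩ := hs rfl
      have hlx : PySem.Str.lower x = "json" := by simpa using hjson
      have hkeep : pvKeep full ((k:Int), x) = false := by
        have hc : ((k:Int) - 1) = ((k-1 : Nat) : Int) := by omega
        simp only [pvKeep, decide_eq_false_iff_not]
        intro ⟨_, hq⟩
        exact hq ⟨by exact_mod_cast hk0, by simpa [hc] using hprev, hlx⟩
      simp only [List.foldl_cons, List.filter_cons, hkeep]
      have step : pvStepA full (acc, true) ((k:Int), x) = (acc, false) := by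
        simp [pvStepA]
      rw [step, hcast1]
      apply ih (k+1) acc false hxs (by simp)
      intro _ h hh _ hfk
      simp only [Nat.add_sub_cancel] at hfk
      rw [hx] at hfk
      exact absurd (hne x hlx) (by simp_all)
    | false =>
      by_cases hxf : x = "--format"
      · subst hxf
        have hkeep : pvKeep full ((k:Int), "--format") = false := by
          simp [pvKeep]
        set c : Bool := decide ((k:Int) + 1 < (full.length : Int) ∧
             (PySem.List.pyGet? full ((k:Int) + 1)).map PySem.Str.lower = some "json") with hc
        have step : pvStepA full (acc, false) ((k:Int), "--format") = (acc, c) := by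
          simp [pvStepA, hc]
        have hciff : c = true ↔ full[k+1]?.map PySem.Str.lower = some "json" := by
          rw [hc]
          simp only [decide_eq_true_eq, hcast1, PySem.List.pyGet?_natCast]
          constructor
          · exact fun ⟨_, h2⟩ => h2
          · intro h2
            refine ⟨?_, h2⟩
            rcases ho : full[k+1]? with _ | y
            · rw [ho] at h2; simp at h2
            · have := List.getElem?_eq_some_iff.mp ho
              exact_mod_cast this.1
        simp only [List.foldl_cons, List.filter_cons, hkeep, step, hcast1]
        apply ih (k+1) acc c hxs
        · intro hct
          refine ⟨Nat.succ_pos k, by simpa using hx, ?_⟩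
          rw [hhead]; exact hciff.mp hct
        · intro hcf y hy _ _ hly
          have : full[k+1]?.map PySem.Str.lower = some "json" := by
            rw [← hhead, hy]; simp [hly]
          rw [← hciff] at this
          simp [hcf] at this
      · have hkeep : pvKeep full ((k:Int), x) = true := by
          simp only [pvKeep, decide_eq_true_eq]
          refine ⟨hxf, ?_⟩
          intro ⟨hk0i, hprev, hlx⟩
          have hk0 : 0 < k := by exact_mod_cast hk0i
          have hc : ((k:Int) - 1) = ((k-1 : Nat) : Int) := by omega
          rw [hc, PySem.List.pyGet?_natCast] at hprev
          exact hn rfl x rfl hk0 hprev hlx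
        have step : pvStepA full (acc, false) ((k:Int), x) = (acc ++ [x], false) := by
          simp [pvStepA, hxf]
        simp only [List.foldl_cons, List.filter_cons, hkeep, step, hcast1]
        rw [ih (k+1) (acc ++ [x]) false hxs (by simp)
          (by intro _ y hy _ hfk; simp only [Nat.add_sub_cancel] at hfk; rw [hx] at hfk; exact absurd (by simpa using hfk) hxf)]
        simp

theorem without_unsupported_format_args_py_spec : Claim_equal_without_unsupported_format_args_py := by
  intro args _
  unfold Spec_without_unsupported_format_args_py without_unsupported_format_args_py
    without_unsupported_format_args_py_alt
  have := pvLoop args args 0 [] false (by simp) (by simp) (by intro _ _ _ h; omega)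
  simpa using this
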